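-- pv_equiv track=rewrite | github.com/Graeme-K/REG.py | src/aim_set_up_Ryan.py | CreateAimint
-- ===== SOURCE A (Python) =====
-- def CreateAimint(files, wfn_files, n_p_task, aimall_loc, max_cores):
--     '''
--     Generate Job files to run for all interactions in aimaill as .sh submission
--
--     files = intra + inter files combined
--     wfn_files = locations of wfn files to use in aimall
--     n_p_task = number of cores per task
--     aimall_loc = location of aimall program on system
--     max_cores = maximum number of cores you want the array to take up
--     '''
--     tc = int(max_cores) // int(n_p_task)
--     no_total_tasks = len(files)
--
--     if tc > no_total_tasks:
--         tc = no_total_tasks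
--
--     out_put = "#!/bin/bash --login \n#$ -S /bin/bash \n#$ -cwd \n#$ -pe smp.pe {} \n#$ -t 1-{} \n#$ -tc {} \n\n".format(str(n_p_task), str(no_total_tasks),str(tc))
--     out_put += "JOB_ARRAY=(\n"
--
--     for wfn in wfn_files:
--         for file in files:
--             if wfn[:4] == file[:4]:
--                 out_put += '"' + " -nproc={} ".format(n_p_task) + str(file) + " " + str(wfn) + '"\n'
--
--     out_put += ")\n\n"
--     out_put += "TID=$[SGE_TASK_ID-1]\n\n"
--     out_put += "IDX=$[TID%{}]\n\n".format(no_total_tasks)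
--     out_put += "JOBID=${JOB_ARRAY[$IDX]}\n\n"
--     out_put += str(aimall_loc) + " $JOBID"
--
--     return out_put
-- ===== SOURCE B (Python) =====
-- def CreateAimint(files, wfn_files, n_p_task, aimall_loc, max_cores):
--     # Group files by 4-char prefix once, then one dict lookup per wfn
--     # instead of A's nested wfn x files rescan.
--     tc = int(max_cores) // int(n_p_task)
--     no_total_tasks = len(files)
--     if tc > no_total_tasks:
--         tc = no_total_tasks
--
--     groups = {}
--     for file in files:
--         groups.setdefault(file[:4], []).append(file)
--
--     body = ""
--     for wfn in wfn_files:
--         for file in groups.get(wfn[:4], []):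
--             body += '" -nproc={} {} {}"\n'.format(n_p_task, file, wfn)
--
--     return ("#!/bin/bash --login \n#$ -S /bin/bash \n#$ -cwd \n#$ -pe smp.pe {} \n#$ -t 1-{} \n#$ -tc {} \n\n".format(n_p_task, no_total_tasks, tc)
--             + "JOB_ARRAY=(\n"
--             + body
--             + ")\n\n"
--             + "TID=$[SGE_TASK_ID-1]\n\n"
--             + "IDX=$[TID%{}]\n\n".format(no_total_tasks)
--             + "JOBID=${JOB_ARRAY[$IDX]}\n\n"
--             + str(aimall_loc) + " $JOBID")
-- ===== Notes on version B (the rewrite author's own statement) =====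
-- stated objective: alternative
-- what changed: Replaces the nested wfn x files scan by a dict grouping files by their 4-char prefix built once, with one lookup per wfn (order of emitted lines preserved); avoids rescanning files per wfn, though total cost is dominated by the emitted lines.
import Mathlib
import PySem

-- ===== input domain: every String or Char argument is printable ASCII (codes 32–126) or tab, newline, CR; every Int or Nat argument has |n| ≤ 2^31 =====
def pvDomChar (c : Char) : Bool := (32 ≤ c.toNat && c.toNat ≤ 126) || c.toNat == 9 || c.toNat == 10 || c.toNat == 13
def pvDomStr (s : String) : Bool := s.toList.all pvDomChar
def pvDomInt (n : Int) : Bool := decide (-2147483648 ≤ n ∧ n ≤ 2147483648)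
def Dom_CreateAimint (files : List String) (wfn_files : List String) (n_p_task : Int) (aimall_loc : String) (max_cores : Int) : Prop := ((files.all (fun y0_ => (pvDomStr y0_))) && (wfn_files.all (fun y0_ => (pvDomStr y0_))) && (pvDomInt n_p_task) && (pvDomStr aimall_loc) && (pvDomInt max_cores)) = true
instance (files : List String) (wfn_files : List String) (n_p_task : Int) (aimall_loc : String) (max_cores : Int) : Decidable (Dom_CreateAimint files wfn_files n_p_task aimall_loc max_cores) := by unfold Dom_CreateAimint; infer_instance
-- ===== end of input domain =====

-- B replaces A's nested wfn x files scan by a dict grouping files by 4-char prefix (alternative algorithm, same output).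

-- ===== PORT A =====
def CreateAimint (files : List String) (wfn_files : List String) (n_p_task : Int) (aimall_loc : String) (max_cores : Int) : String :=
  let tc := PySem.Int.floordiv max_cores n_p_task
  let no_total_tasks : Int := (files.length : Int)
  let tc := if tc > no_total_tasks then no_total_tasks else tc
  let out_put := "#!/bin/bash --login \n#$ -S /bin/bash \n#$ -cwd \n#$ -pe smp.pe " ++ PySem.Int.toStr n_p_task ++ " \n#$ -t 1-" ++ PySem.Int.toStr no_total_tasks ++ " \n#$ -tc " ++ PySem.Int.toStr tc ++ " \n\n"
  let out_put := out_put ++ "JOB_ARRAY=(\n"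
  let out_put := wfn_files.foldl (fun out_put wfn =>
    files.foldl (fun out_put file =>
      if PySem.Str.slice wfn none (some 4) == PySem.Str.slice file none (some 4) then
        out_put ++ ("\"" ++ (" -nproc=" ++ PySem.Int.toStr n_p_task ++ " ") ++ file ++ " " ++ wfn ++ "\"\n")
      else out_put) out_put) out_put
  let out_put := out_put ++ ")\n\n"
  let out_put := out_put ++ "TID=$[SGE_TASK_ID-1]\n\n"
  let out_put := out_put ++ ("IDX=$[TID%" ++ PySem.Int.toStr no_total_tasks ++ "]\n\n")
  let out_put := out_put ++ "JOBID=${JOB_ARRAY[$IDX]}\n\n"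
  let out_put := out_put ++ aimall_loc ++ " $JOBID"
  out_put

-- ===== PORT B =====
-- one job line: '" -nproc={} {} {}"\n'.format(n_p_task, file, wfn)
def pvLineB (n_p_task : Int) (wfn file : String) : String :=
  "\" -nproc=" ++ PySem.Int.toStr n_p_task ++ " " ++ file ++ " " ++ wfn ++ "\"\n"

-- groups.setdefault(file[:4], []).append(file) over all files
def pvGroupsB (files : List String) : PySem.Dict String (List String) :=
  files.foldl (fun d file => d.modify (PySem.Str.slice file none (some 4)) [] (· ++ [file])) PySem.Dict.empty

def CreateAimint_alt (files : List String) (wfn_files : List String) (n_p_task : Int) (aimall_loc : String) (max_cores : Int) : String :=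
  let tc := PySem.Int.floordiv max_cores n_p_task
  let no_total_tasks : Int := (files.length : Int)
  let tc := if tc > no_total_tasks then no_total_tasks else tc
  let groups := pvGroupsB files
  let body := wfn_files.foldl (fun body wfn =>
    (groups.getD (PySem.Str.slice wfn none (some 4)) []).foldl (fun body file =>
      body ++ pvLineB n_p_task wfn file) body) ""
  ("#!/bin/bash --login \n#$ -S /bin/bash \n#$ -cwd \n#$ -pe smp.pe " ++ PySem.Int.toStr n_p_task ++ " \n#$ -t 1-" ++ PySem.Int.toStr no_total_tasks ++ " \n#$ -tc " ++ PySem.Int.toStr tc ++ " \n\n")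
    ++ "JOB_ARRAY=(\n"
    ++ body
    ++ ")\n\n"
    ++ "TID=$[SGE_TASK_ID-1]\n\n"
    ++ ("IDX=$[TID%" ++ PySem.Int.toStr no_total_tasks ++ "]\n\n")
    ++ "JOBID=${JOB_ARRAY[$IDX]}\n\n"
    ++ aimall_loc ++ " $JOBID"

-- ===== PRECONDITION & SPEC =====
-- A raises ZeroDivisionError when n_p_task = 0; excluded (B raises there too).
def Pre_CreateAimint (files : List String) (wfn_files : List String) (n_p_task : Int) (aimall_loc : String) (max_cores : Int) : Prop := n_p_task ≠ 0
instance (files : List String) (wfn_files : List String) (n_p_task : Int) (aimall_loc : String) (max_cores : Int) : Decidable (Pre_CreateAimint files wfn_files n_p_task aimall_loc max_cores) := by unfold Pre_CreateAimint; infer_instance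

def pvWitness_CreateAimint : List String × List String × Int × String × Int :=
  (["abcd.int", "efgh.int"], ["abcd.wfn"], 2, "/opt/aimall", 4)

def Spec_CreateAimint (files : List String) (wfn_files : List String) (n_p_task : Int) (aimall_loc : String) (max_cores : Int) (out : String) : Prop := out = CreateAimint_alt files wfn_files n_p_task aimall_loc max_cores
instance (files : List String) (wfn_files : List String) (n_p_task : Int) (aimall_loc : String) (max_cores : Int) (out : String) : Decidable (Spec_CreateAimint files wfn_files n_p_task aimall_loc max_cores out) := by unfold Spec_CreateAimint; infer_instance

-- ===== CLAIM =====
def Claim_equal_CreateAimint : Prop := ∀ (files : List String) (wfn_files : List String) (n_p_task : Int) (aimall_loc : String) (max_cores : Int), Dom_CreateAimint files wfn_files n_p_task aimall_loc max_cores → Pre_CreateAimint files wfn_files n_p_task aimall_loc max_cores → Spec_CreateAimint files wfn_files n_p_task aimall_loc max_cores (CreateAimint files wfn_files n_p_task aimall_loc max_cores)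

-- ===== LEMMAS AND PROOFS =====

-- the two string-literal decompositions of a job line agree
theorem pvLine_merge (n : Int) (wfn f : String) :
    "\"" ++ (" -nproc=" ++ PySem.Int.toStr n ++ " ") ++ f ++ " " ++ wfn ++ "\"\n"
      = pvLineB n wfn f := by
  have h : "\"" ++ " -nproc=" = "\" -nproc=" := rfl
  unfold pvLineB
  simp only [← String.append_assoc]
  rw [h]

-- The grouping dict looks up to the sublist of files with the given prefix.
theorem pvGroupsB_getD (files : List String) (c : String) :
    (pvGroupsB files).getD c [] = files.filter (fun f => PySem.Str.slice f none (some 4) == c) := by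
  unfold pvGroupsB
  suffices h : ∀ (l : List String) (d : PySem.Dict String (List String)),
      (l.foldl (fun d file => d.modify (PySem.Str.slice file none (some 4)) [] (· ++ [file])) d).getD c []
        = d.getD c [] ++ l.filter (fun f => PySem.Str.slice f none (some 4) == c) by
    simpa using h files PySem.Dict.empty
  intro l
  induction l with
  | nil => intro d; simp
  | cons x xs ih =>
    intro d
    simp only [List.foldl_cons, List.filter_cons, ih]
    rw [PySem.Dict.getD_modify]
    by_cases hc : c = PySem.Str.slice x none (some 4)
    · simp [hc]
    · have hb : (PySem.Str.slice x none (some 4) == c) = false := by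
        simp only [beq_eq_false_iff_ne]; exact fun h => hc h.symm
      simp [hc, hb]

-- A's inner scan over files equals a scan over the filtered sublist.
theorem pvInner_eq (files : List String) (n_p_task : Int) (wfn : String) (acc : String) :
    files.foldl (fun out_put file =>
      if PySem.Str.slice wfn none (some 4) == PySem.Str.slice file none (some 4) then
        out_put ++ ("\"" ++ (" -nproc=" ++ PySem.Int.toStr n_p_task ++ " ") ++ file ++ " " ++ wfn ++ "\"\n")
      else out_put) acc
    = (files.filter (fun f => PySem.Str.slice f none (some 4) == PySem.Str.slice wfn none (some 4))).foldl
        (fun body file => body ++ pvLineB n_p_task wfn file) acc := by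
  induction files generalizing acc with
  | nil => rfl
  | cons x xs ih =>
    simp only [List.foldl_cons, List.filter_cons]
    by_cases h : PySem.Str.slice wfn none (some 4) = PySem.Str.slice x none (some 4)
    · have h1 : (PySem.Str.slice wfn none (some 4) == PySem.Str.slice x none (some 4)) = true := by
        simp [h]
      have h2 : (PySem.Str.slice x none (some 4) == PySem.Str.slice wfn none (some 4)) = true := by
        simp [h]
      rw [h1, if_pos rfl, h2]
      simp only [if_true, List.foldl_cons, ih]
      rw [pvLine_merge]
    · have h1 : (PySem.Str.slice wfn none (some 4) == PySem.Str.slice x none (some 4)) = false := by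
        simp only [beq_eq_false_iff_ne]; exact h
      have h2 : (PySem.Str.slice x none (some 4) == PySem.Str.slice wfn none (some 4)) = false := by
        simp only [beq_eq_false_iff_ne]; exact fun hx => h hx.symm
      rw [h1, if_neg (by simp), h2, ih]
      simp

-- Pulling the accumulated prefix out of a string-appending foldl.
theorem pvFoldl_pull {β : Type} (l : List β) (g : β → String) (a : String) :
    l.foldl (fun acc x => acc ++ g x) a = a ++ l.foldl (fun acc x => acc ++ g x) "" := by
  induction l generalizing a with
  | nil => simp
  | cons x xs ih =>
    simp only [List.foldl_cons]
    rw [ih (a ++ g x), ih ("" ++ g x)]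
    simp [String.append_assoc]

theorem pvBody_pull (wfn_files : List String) (groups : PySem.Dict String (List String))
    (n_p_task : Int) (a : String) :
    wfn_files.foldl (fun body wfn =>
      (groups.getD (PySem.Str.slice wfn none (some 4)) []).foldl
        (fun body file => body ++ pvLineB n_p_task wfn file) body) a
    = a ++ wfn_files.foldl (fun body wfn =>
      (groups.getD (PySem.Str.slice wfn none (some 4)) []).foldl
        (fun body file => body ++ pvLineB n_p_task wfn file) body) "" := by
  induction wfn_files generalizing a with
  | nil => simp
  | cons x xs ih =>
    simp only [List.foldl_cons]
    rw [ih, pvFoldl_pull _ (fun file => pvLineB n_p_task x file) a,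
        pvFoldl_pull _ (fun file => pvLineB n_p_task x file) ("" : String),
        ih (("" : String) ++ _)]
    simp [String.append_assoc]

-- ===== VERDICT =====
theorem CreateAimint_spec : Claim_equal_CreateAimint := by
  intro files wfn_files n_p_task aimall_loc max_cores _ _
  unfold Spec_CreateAimint CreateAimint CreateAimint_alt
  have hloops : ∀ (acc : String),
      wfn_files.foldl (fun out_put wfn =>
        files.foldl (fun out_put file =>
          if PySem.Str.slice wfn none (some 4) == PySem.Str.slice file none (some 4) then
            out_put ++ ("\"" ++ (" -nproc=" ++ PySem.Int.toStr n_p_task ++ " ") ++ file ++ " " ++ wfn ++ "\"\n")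
          else out_put) out_put) acc
      = wfn_files.foldl (fun body wfn =>
          ((pvGroupsB files).getD (PySem.Str.slice wfn none (some 4)) []).foldl
            (fun body file => body ++ pvLineB n_p_task wfn file) body) acc := by
    intro acc
    apply PySem.List.foldl_congr_mem
    intro a wfn _
    rw [pvInner_eq, pvGroupsB_getD]
  simp only [hloops]
  rw [pvBody_pull]
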